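-- pv_equiv track=rewrite | github.com/TurnaboutHero/Vainglory_REVERSE_ENGINEERING | vg/analysis/entity_network_mapper.py | _compute_lifecycle_spans
-- ===== SOURCE A (Python) =====
-- from typing import Dict, List, Any, Optional, Tuple, Set
--
-- def _compute_lifecycle_spans(
--     frames_seen: List[int],
--     gap_threshold: int,
-- ) -> List[Tuple[int, int]]:
--     """
--     Compute lifecycle spans (spawn/death/respawn cycles) from frame presence data.
--
--     A gap of more than gap_threshold frames between appearances indicates death/respawn.
--
--     Returns:
--         List of (spawn_frame, death_frame) tuples.
--     """
--     if not frames_seen: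
--         return []
--
--     spans = []
--     span_start = frames_seen[0]
--     prev_frame = frames_seen[0]
--
--     for frame in frames_seen[1:]:
--         if frame - prev_frame > gap_threshold:
--             spans.append((span_start, prev_frame))
--             span_start = frame
--         prev_frame = frame
--
--     # Close the last span
--     spans.append((span_start, prev_frame))
--     return spans
-- ===== SOURCE B (Python) =====
-- from typing import List, Tuple
--
--
-- def _compute_lifecycle_spans(
--     frames_seen: List[int],
--     gap_threshold: int,
-- ) -> List[Tuple[int, int]]:
--     """Two-phase reformulation: collect break indices, then emit spans
--     from consecutive boundary pairs."""
--     if not frames_seen: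
--         return []
--     # Phase 1: indices where a new span starts (gap before them too large).
--     breaks = [i for i in range(1, len(frames_seen))
--               if frames_seen[i] - frames_seen[i - 1] > gap_threshold]
--     # Phase 2: boundary list and one span per consecutive boundary pair.
--     bounds = [0] + breaks + [len(frames_seen)]
--     return [(frames_seen[lo], frames_seen[hi - 1])
--             for lo, hi in zip(bounds, bounds[1:])]
-- ===== Notes on version B (the rewrite author's own statement) =====
-- stated objective: alternative
-- what changed: Replaces A's single accumulator loop (carrying span_start/prev and appending spans inline) by two separate phases: first collect the break indices where the gap exceeds the threshold, then build the spans from consecutive boundary pairs [0]+breaks+[len].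
import Mathlib
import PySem

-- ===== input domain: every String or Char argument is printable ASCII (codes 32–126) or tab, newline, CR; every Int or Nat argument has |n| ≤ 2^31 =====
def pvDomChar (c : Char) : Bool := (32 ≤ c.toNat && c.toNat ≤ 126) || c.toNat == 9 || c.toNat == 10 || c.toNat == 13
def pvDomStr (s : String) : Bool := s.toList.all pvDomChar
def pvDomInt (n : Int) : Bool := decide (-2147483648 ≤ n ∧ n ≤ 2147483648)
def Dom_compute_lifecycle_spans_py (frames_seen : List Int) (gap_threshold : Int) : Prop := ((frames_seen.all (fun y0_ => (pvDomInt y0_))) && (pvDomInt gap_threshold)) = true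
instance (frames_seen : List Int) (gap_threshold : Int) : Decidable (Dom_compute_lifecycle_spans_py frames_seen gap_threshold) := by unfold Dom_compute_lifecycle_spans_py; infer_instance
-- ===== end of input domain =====

-- B replaces A's single accumulator loop by two phases (collect break indices, then build spans
-- from consecutive boundary pairs); same O(n) cost, alternative decomposition.


-- ===== PORT A =====
-- the body of A's for-loop (state = (spans, span_start, prev_frame))
def pvStepA (gap_threshold : Int) (st : List (Int × Int) × Int × Int) (frame : Int) :
    List (Int × Int) × Int × Int :=
  if frame - st.2.2 > gap_threshold then (st.1 ++ [(st.2.1, st.2.2)], frame, frame)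
  else (st.1, st.2.1, frame)

def compute_lifecycle_spans_py (frames_seen : List Int) (gap_threshold : Int) : List (Int × Int) :=
  match frames_seen with
  | [] => []
  | f0 :: _ =>
    -- spans = [], span_start = frames_seen[0], prev_frame = frames_seen[0]; loop over frames_seen[1:]
    let st := (PySem.List.slice frames_seen (some 1) none).foldl
                (pvStepA gap_threshold) ([], f0, f0)
    st.1 ++ [(st.2.1, st.2.2)]

-- ===== PORT B =====
def compute_lifecycle_spans_py_alt (frames_seen : List Int) (gap_threshold : Int) :
    List (Int × Int) :=
  if frames_seen = [] then []
  else
    let breaks := (PySem.List.pyRange 1 (frames_seen.length : Int) 1).filter (fun i =>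
      decide (PySem.List.pyGetD frames_seen i 0 - PySem.List.pyGetD frames_seen (i - 1) 0
               > gap_threshold))
    let bounds := 0 :: (breaks ++ [(frames_seen.length : Int)])
    (bounds.zip bounds.tail).map (fun p =>
      (PySem.List.pyGetD frames_seen p.1 0, PySem.List.pyGetD frames_seen (p.2 - 1) 0))

-- ===== PRECONDITION & SPEC =====
def Spec_compute_lifecycle_spans_py (frames_seen : List Int) (gap_threshold : Int) (out : List (Int × Int)) : Prop := out = compute_lifecycle_spans_py_alt frames_seen gap_threshold
instance (frames_seen : List Int) (gap_threshold : Int) (out : List (Int × Int)) : Decidable (Spec_compute_lifecycle_spans_py frames_seen gap_threshold out) := by unfold Spec_compute_lifecycle_spans_py; infer_instance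

-- ===== CLAIM (what is proved, stated in full; the proofs are below) =====
def Claim_equal_compute_lifecycle_spans_py : Prop := ∀ (frames_seen : List Int) (gap_threshold : Int), Dom_compute_lifecycle_spans_py frames_seen gap_threshold → Spec_compute_lifecycle_spans_py frames_seen gap_threshold (compute_lifecycle_spans_py frames_seen gap_threshold)

-- ===== LEMMAS AND PROOFS =====

-- B's phases, named for the proofs (definitionally the pieces of the port of B)
def pvBreaks (fs : List Int) (g : Int) : List Int :=
  (PySem.List.pyRange 1 (fs.length : Int) 1).filter (fun i =>
    decide (PySem.List.pyGetD fs i 0 - PySem.List.pyGetD fs (i - 1) 0 > g))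

def pvPairF (fs : List Int) (p : Int × Int) : Int × Int :=
  (PySem.List.pyGetD fs p.1 0, PySem.List.pyGetD fs (p.2 - 1) 0)

def pvSpans (fs : List Int) (g : Int) : List (Int × Int) :=
  (((0 : Int) :: (pvBreaks fs g ++ [(fs.length : Int)])).zip
      (pvBreaks fs g ++ [(fs.length : Int)])).map (pvPairF fs)

lemma alt_eq_pvSpans (fs : List Int) (g : Int) (h : fs ≠ []) :
    compute_lifecycle_spans_py_alt fs g = pvSpans fs g := by
  simp [compute_lifecycle_spans_py_alt, pvSpans, pvBreaks, pvPairF, h]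

-- A unfolded on a nonempty list
lemma A_cons (f0 : Int) (rest : List Int) (g : Int) :
    compute_lifecycle_spans_py (f0 :: rest) g =
      (rest.foldl (pvStepA g) ([], f0, f0)).1 ++
        [((rest.foldl (pvStepA g) ([], f0, f0)).2.1,
          (rest.foldl (pvStepA g) ([], f0, f0)).2.2)] := by
  simp [compute_lifecycle_spans_py, PySem.List.slice_from_one]

-- prev_frame after A's loop is the last frame processed
lemma pvPrev (g : Int) (l : List Int) : ∀ sp s p,
    (l.foldl (pvStepA g) (sp, s, p)).2.2 = l.getLastD p := by
  induction l with
  | nil => intro sp s p; rfl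
  | cons a t ih =>
    intro sp s p
    simp only [List.foldl_cons, pvStepA, List.getLastD_cons]
    split_ifs <;> exact ih _ _ _

-- last element of a nonempty list, as getLastD
lemma pvLastD_getElem (l : List Int) (h : l ≠ []) (d : Int) :
    l.getLastD d = l[l.length - 1]'(by cases l; simp at h; simp) := by
  simp [List.getLastD_eq_getLast?, List.getLast?_eq_some_getLast h]
  exact List.getLast_eq_getElem h

lemma pvLastD_mem (l : List Int) (h : l ≠ []) (d : Int) : l.getLastD d ∈ l := by
  simp [List.getLastD_eq_getLast?, List.getLast?_eq_some_getLast h]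

-- indexing facts about l ++ [z]
lemma pvGetConcat (l : List Int) (z i : Int) (h0 : 0 ≤ i) (h1 : i < (l.length : Int)) :
    PySem.List.pyGetD (l ++ [z]) i 0 = PySem.List.pyGetD l i 0 := by
  rw [PySem.List.pyGetD_eq_getElem (l ++ [z]) 0 h0 (by simp; omega),
      PySem.List.pyGetD_eq_getElem l 0 h0 h1]
  exact List.getElem_append_left (by omega)

lemma pvGetLen (l : List Int) (z : Int) :
    PySem.List.pyGetD (l ++ [z]) (l.length : Int) 0 = z := by
  rw [PySem.List.pyGetD_eq_getElem (l ++ [z]) 0 (by omega) (by simp)]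
  exact List.getElem_concat_length (by omega) _

lemma pvGetLast (l : List Int) (h : l ≠ []) :
    PySem.List.pyGetD l ((l.length : Int) - 1) 0 = l.getLastD 0 := by
  have hn : 0 < l.length := List.length_pos_iff.mpr h
  rw [PySem.List.pyGetD_eq_getElem l 0 (by omega) (by omega), pvLastD_getElem l h 0]
  simp only [show ((l.length : Int) - 1).toNat = l.length - 1 by omega]

-- reading an admissible boundary pair through l ++ [z]
lemma pairF_ext (l : List Int) (z : Int) (p : Int × Int)
    (h1 : 0 ≤ p.1) (h2 : p.1 < (l.length : Int))
    (h3 : 1 ≤ p.2) (h4 : p.2 ≤ (l.length : Int)) :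
    pvPairF (l ++ [z]) p = pvPairF l p := by
  unfold pvPairF
  rw [pvGetConcat l z p.1 h1 h2, pvGetConcat l z (p.2 - 1) (by omega) (by omega)]

-- adjacent pairs of a boundary list with one more bound appended
lemma zip_tail_concat (x : Int) (t : List Int) (w d : Int) :
    ((x :: (t ++ [w])).zip (t ++ [w])) = ((x :: t).zip t) ++ [((x :: t).getLastD d, w)] := by
  induction t generalizing x with
  | nil => simp
  | cons y t' ih =>
    simp only [List.cons_append, List.zip_cons_cons, List.getLastD_cons]
    rw [show (y :: (t' ++ [w])).zip (t' ++ [w]) = ((y :: t').zip t') ++ [((y :: t').getLastD d, w)] from ih y]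
    cases t' with
    | nil => simp
    | cons u us => simp [List.getLast?_eq_some_getLast (show u :: us ≠ [] by simp)]

-- components of adjacent pairs come from dropLast / tail
lemma mem_zip_head (x : Int) (t : List Int) (p : Int × Int) (h : p ∈ (x :: t).zip t) :
    p.1 ∈ (x :: t).dropLast ∧ p.2 ∈ t := by
  induction t generalizing x with
  | nil => simp at h
  | cons y t' ih =>
    simp only [List.zip_cons_cons, List.mem_cons] at h
    rcases h with h | h
    · subst h; exact ⟨by simp [List.dropLast_cons₂], by simp⟩
    · have := ih y h
      refine ⟨?_, List.mem_cons_of_mem _ this.2⟩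
      rw [List.dropLast_cons₂]
      exact List.mem_cons_of_mem _ this.1

lemma mem_pvBreaks (fs : List Int) (g : Int) (i : Int) (h : i ∈ pvBreaks fs g) :
    1 ≤ i ∧ i < (fs.length : Int) := by
  have := List.mem_filter.mp h
  exact (PySem.List.mem_pyRange_one).mp this.1

-- break indices of l ++ [z] in terms of those of l
lemma pvBreaks_concat (l : List Int) (z g : Int) (h : l ≠ []) :
    pvBreaks (l ++ [z]) g =
      pvBreaks l g ++ (if z - l.getLastD 0 > g then [(l.length : Int)] else []) := by
  have hn : 0 < l.length := List.length_pos_iff.mpr h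
  have hlen : (((l ++ [z]).length : Nat) : Int) = (l.length : Int) + 1 := by simp
  unfold pvBreaks
  rw [hlen, PySem.List.pyRange_one_succ_right (by omega), List.filter_append]
  congr 1
  · apply List.filter_congr
    intro i hi
    obtain ⟨hi1, hi2⟩ := PySem.List.mem_pyRange_one.mp hi
    rw [pvGetConcat l z i (by omega) hi2, pvGetConcat l z (i - 1) (by omega) (by omega)]
  · rw [List.filter_singleton]
    have e2 : PySem.List.pyGetD (l ++ [z]) ((l.length : Int) - 1) 0 = l.getLastD 0 := by
      rw [pvGetConcat l z _ (by omega) (by omega), pvGetLast l h]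
    rw [pvGetLen l z, e2]
    simp

-- appending a frame that opens a gap appends the one-frame span (z, z)
lemma pvSpans_concat_gap (l : List Int) (z g : Int) (h : l ≠ [])
    (hgap : z - l.getLastD 0 > g) :
    pvSpans (l ++ [z]) g = pvSpans l g ++ [(z, z)] := by
  have hn : 0 < l.length := List.length_pos_iff.mpr h
  have hlen : (((l ++ [z]).length : Nat) : Int) = (l.length : Int) + 1 := by simp
  unfold pvSpans
  rw [pvBreaks_concat l z g h, if_pos hgap, hlen,
      zip_tail_concat 0 (pvBreaks l g ++ [(l.length : Int)]) ((l.length : Int) + 1) 0,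
      List.map_append]
  congr 1
  · apply List.map_congr_left
    intro p hp
    obtain ⟨hp1, hp2⟩ := mem_zip_head _ _ _ hp
    rw [show ((0 : Int) :: (pvBreaks l g ++ [(l.length : Int)])).dropLast = (0 : Int) :: pvBreaks l g by
          rw [show ((0 : Int) :: (pvBreaks l g ++ [(l.length : Int)])) = ((0 : Int) :: pvBreaks l g) ++ [(l.length : Int)] by simp]
          exact List.dropLast_concat] at hp1
    have hb1 : 0 ≤ p.1 ∧ p.1 < (l.length : Int) := by
      rcases List.mem_cons.mp hp1 with h' | h'
      · exact ⟨by omega, by rw [h']; omega⟩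
      · have := mem_pvBreaks l g _ h'; exact ⟨by omega, this.2⟩
    have hb2 : 1 ≤ p.2 ∧ p.2 ≤ (l.length : Int) := by
      rcases List.mem_append.mp hp2 with h' | h'
      · have := mem_pvBreaks l g _ h'; exact ⟨this.1, by omega⟩
      · have : p.2 = (l.length : Int) := by simpa using h'
        exact ⟨by omega, by omega⟩
    exact pairF_ext l z p hb1.1 hb1.2 hb2.1 hb2.2
  · rw [show ((0 : Int) :: (pvBreaks l g ++ [(l.length : Int)])).getLastD 0 = (l.length : Int) by
          rw [List.getLastD_cons]; exact List.getLastD_concat]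
    unfold pvPairF
    simp only [List.map_cons, List.map_nil]
    rw [show (l.length : Int) + 1 - 1 = (l.length : Int) by ring, pvGetLen l z]

-- appending a frame inside the gap threshold extends the last span to z
lemma pvSpans_concat_nogap (l : List Int) (z g : Int) (h : l ≠ [])
    (hgap : ¬ z - l.getLastD 0 > g) (init : List (Int × Int)) (a : Int)
    (hl : pvSpans l g = init ++ [(a, l.getLastD 0)]) :
    pvSpans (l ++ [z]) g = init ++ [(a, z)] := by
  have hn : 0 < l.length := List.length_pos_iff.mpr h
  have hlen : (((l ++ [z]).length : Nat) : Int) = (l.length : Int) + 1 := by simp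
  have hL : pvSpans l g =
      (((0 : Int) :: pvBreaks l g).zip (pvBreaks l g)).map (pvPairF l)
        ++ [pvPairF l (((0 : Int) :: pvBreaks l g).getLastD 0, (l.length : Int))] := by
    unfold pvSpans
    rw [zip_tail_concat 0 (pvBreaks l g) (l.length : Int) 0, List.map_append]
    rfl
  rw [hL] at hl
  obtain ⟨e1, e2⟩ := List.append_singleton_inj.mp hl
  unfold pvSpans
  rw [pvBreaks_concat l z g h, if_neg hgap, List.append_nil, hlen,
      zip_tail_concat 0 (pvBreaks l g) ((l.length : Int) + 1) 0, List.map_append]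
  congr 1
  · rw [← e1]
    apply List.map_congr_left
    intro p hp
    obtain ⟨hp1, hp2⟩ := mem_zip_head _ _ _ hp
    have hp1' : p.1 ∈ (0 : Int) :: pvBreaks l g := List.dropLast_subset _ hp1
    have hb1 : 0 ≤ p.1 ∧ p.1 < (l.length : Int) := by
      rcases List.mem_cons.mp hp1' with h' | h'
      · exact ⟨by omega, by rw [h']; omega⟩
      · have := mem_pvBreaks l g _ h'; exact ⟨by omega, this.2⟩
    have hb2 := mem_pvBreaks l g _ hp2
    exact pairF_ext l z p hb1.1 hb1.2 hb2.1 (by omega)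
  · have hmem : ((0 : Int) :: pvBreaks l g).getLastD 0 ∈ (0 : Int) :: pvBreaks l g :=
      pvLastD_mem _ (by simp) 0
    have hb0 : 0 ≤ ((0 : Int) :: pvBreaks l g).getLastD 0 ∧
        ((0 : Int) :: pvBreaks l g).getLastD 0 < (l.length : Int) := by
      rcases List.mem_cons.mp hmem with h' | h'
      · exact ⟨by omega, by rw [h']; omega⟩
      · have := mem_pvBreaks l g _ h'; exact ⟨by omega, this.2⟩
    have efst : PySem.List.pyGetD l (((0 : Int) :: pvBreaks l g).getLastD 0) 0 = a := by
      have := congrArg Prod.fst e2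
      simpa [pvPairF] using this
    unfold pvPairF
    simp only [List.map_cons, List.map_nil]
    rw [show (l.length : Int) + 1 - 1 = (l.length : Int) by ring,
        pvGetConcat l z _ hb0.1 hb0.2, efst, pvGetLen l z]

-- main induction: on nonempty input, A and B both end with (a, last frame) over the same prefix
lemma main_lemma (g : Int) (fs : List Int) : fs ≠ [] →
    ∃ init a, compute_lifecycle_spans_py fs g = init ++ [(a, fs.getLastD 0)]
            ∧ pvSpans fs g = init ++ [(a, fs.getLastD 0)] := by
  induction fs using List.reverseRecOn with
  | nil => intro h; exact absurd rfl h
  | append_singleton l z ih =>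
    intro _
    rcases l with _ | ⟨f0, rest⟩
    · refine ⟨[], z, ?_, ?_⟩
      · simpa using A_cons z [] g
      · simp [pvSpans, pvBreaks, pvPairF, PySem.List.pyRange_one_eq_nil (le_refl (1 : Int))]
    · obtain ⟨init, a, hA, hB⟩ := ih (by simp)
      set st := rest.foldl (pvStepA g) (([] : List (Int × Int)), f0, f0) with hst
      have hprev : st.2.2 = (f0 :: rest).getLastD 0 :=
        (pvPrev g rest [] f0 f0).trans List.getLastD_cons.symm
      have hA' : compute_lifecycle_spans_py (f0 :: rest) g = st.1 ++ [(st.2.1, st.2.2)] :=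
        A_cons f0 rest g
      have hA2 : compute_lifecycle_spans_py ((f0 :: rest) ++ [z]) g =
          (pvStepA g st z).1 ++ [((pvStepA g st z).2.1, (pvStepA g st z).2.2)] := by
        rw [List.cons_append, A_cons f0 (rest ++ [z]) g]
        simp only [List.foldl_append, List.foldl_cons, List.foldl_nil, hst]
      have hinj := List.append_singleton_inj.mp (hA'.symm.trans hA)
      have ea : st.2.1 = a := by
        have := hinj.2
        rw [Prod.ext_iff] at this
        exact this.1
      by_cases hgap : z - (f0 :: rest).getLastD 0 > g
      · refine ⟨init ++ [(a, (f0 :: rest).getLastD 0)], z, ?_, ?_⟩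
        · rw [hA2]
          simp only [pvStepA, hprev, if_pos hgap]
          rw [List.getLastD_concat, hinj.1, ea]
        · rw [pvSpans_concat_gap (f0 :: rest) z g (by simp) hgap, hB, List.getLastD_concat]
      · refine ⟨init, a, ?_, ?_⟩
        · rw [hA2]
          simp only [pvStepA, hprev, if_neg hgap]
          rw [List.getLastD_concat, hinj.1, ea]
        · rw [List.getLastD_concat]
          exact pvSpans_concat_nogap (f0 :: rest) z g (by simp) hgap init a hB

-- ===== VERDICT (by name: the statement is the Claim_ definition above) =====
theorem compute_lifecycle_spans_py_spec : Claim_equal_compute_lifecycle_spans_py := by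
  intro fs g _
  unfold Spec_compute_lifecycle_spans_py
  cases hfs : fs with
  | nil => rfl
  | cons f0 rest =>
    have hne : fs ≠ [] := by simp [hfs]
    obtain ⟨init, a, hA, hB⟩ := main_lemma g fs hne
    rw [← hfs, hA, alt_eq_pvSpans fs g hne, hB]
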